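-- pv_equiv track=rewrite | github.com/Motterdude/nanum-pipeline-28 | pipeline16.py | _find_header_row
-- ===== SOURCE A (Python) =====
-- from typing import Optional, List, Dict, Tuple
--
-- def _find_header_row(lines: List[str], delim: str, min_cols: int = 6) -> int:
--     best_i = 0
--     best_cols = 0
--     for i, ln in enumerate(lines[:80]):
--         cols = ln.split(delim)
--         ncols = len(cols)
--         if ncols > best_cols:
--             best_cols = ncols
--             best_i = i
--         if ncols >= min_cols and any(ch.isalpha() for ch in ln):
--             return i
--     return best_i
-- ===== SOURCE B (Python) =====
-- def _find_header_row(lines, delim, min_cols=6):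
--     window = lines[:80]
--     # pass 1: first header-like row wins immediately
--     for i, ln in enumerate(window):
--         if len(ln.split(delim)) >= min_cols and any(ch.isalpha() for ch in ln):
--             return i
--     # pass 2: fallback — index of the first row with the maximum column count
--     best_i = 0
--     best_cols = 0
--     for i, ln in enumerate(window):
--         c = len(ln.split(delim))
--         if c > best_cols:
--             best_i, best_cols = i, c
--     return best_i
-- ===== Notes on version B (the rewrite author's own statement) =====
-- stated objective: simpler
-- what changed: Splits A's single stateful loop with an early return into two clean passes: a first-match search for a header-like row, then (only if none is found) a separate first-argmax pass over column counts.
import Mathlib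
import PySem

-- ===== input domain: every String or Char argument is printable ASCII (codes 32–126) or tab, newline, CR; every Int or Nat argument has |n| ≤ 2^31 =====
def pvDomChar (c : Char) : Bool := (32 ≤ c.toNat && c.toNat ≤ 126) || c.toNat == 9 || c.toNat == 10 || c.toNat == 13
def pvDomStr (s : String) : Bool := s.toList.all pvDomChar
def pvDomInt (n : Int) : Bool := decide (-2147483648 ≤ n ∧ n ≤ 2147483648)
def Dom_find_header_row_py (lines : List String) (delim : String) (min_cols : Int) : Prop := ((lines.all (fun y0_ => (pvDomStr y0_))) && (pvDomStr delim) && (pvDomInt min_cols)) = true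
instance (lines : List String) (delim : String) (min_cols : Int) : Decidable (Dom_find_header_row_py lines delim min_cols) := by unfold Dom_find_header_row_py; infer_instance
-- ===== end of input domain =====

-- B replaces A's single stateful early-return loop by two separate passes (first-match search, then first-argmax fallback): simpler decomposition, same cost.


-- ===== PORT A =====
-- A's loop: threads (best_i, best_cols), early-returns on a header-like row.
def pvALoop (delim : String) (min_cols : Int) : List (Int × String) → Int → Int → Int
  | [], bi, _ => bi
  | (i, ln) :: rest, bi, bc =>
    let ncols : Int := (PySem.Chars.splitOn ln.toList delim.toList).length
    let bi' : Int := if ncols > bc then i else bi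
    let bc' : Int := if ncols > bc then ncols else bc
    if ncols ≥ min_cols ∧ ln.toList.any PySem.Chars.isalpha then i
    else pvALoop delim min_cols rest bi' bc'

def find_header_row_py (lines : List String) (delim : String) (min_cols : Int) : Int :=
  pvALoop delim min_cols (PySem.List.enumerate (PySem.List.slice lines none (some 80))) 0 0

-- ===== PORT B =====
-- pass 1: first header-like row
def pvBFind (delim : String) (min_cols : Int) : List (Int × String) → Option Int
  | [] => none
  | (i, ln) :: rest =>
    if ((PySem.Chars.splitOn ln.toList delim.toList).length : Int) ≥ min_cols ∧ ln.toList.any PySem.Chars.isalpha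
    then some i
    else pvBFind delim min_cols rest

-- pass 2: first index achieving the maximum column count
def pvBBest (delim : String) : List (Int × String) → Int → Int → Int
  | [], bi, _ => bi
  | (i, ln) :: rest, bi, bc =>
    let c : Int := (PySem.Chars.splitOn ln.toList delim.toList).length
    if c > bc then pvBBest delim rest i c else pvBBest delim rest bi bc

def find_header_row_py_alt (lines : List String) (delim : String) (min_cols : Int) : Int :=
  let window := PySem.List.slice lines none (some 80)
  match pvBFind delim min_cols (PySem.List.enumerate window) with
  | some i => i
  | none => pvBBest delim (PySem.List.enumerate window) 0 0

-- ===== PRECONDITION & SPEC =====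
-- Pre_ excludes only delim = "", on which Python's str.split raises ValueError (for A and B alike).
def Pre_find_header_row_py (lines : List String) (delim : String) (min_cols : Int) : Prop := delim ≠ ""
instance (lines : List String) (delim : String) (min_cols : Int) : Decidable (Pre_find_header_row_py lines delim min_cols) := by unfold Pre_find_header_row_py; infer_instance
def pvWitness_find_header_row_py : List String × String × Int := (["a,b", "1,2,3"], ",", 2)

def Spec_find_header_row_py (lines : List String) (delim : String) (min_cols : Int) (out : Int) : Prop := out = find_header_row_py_alt lines delim min_cols
instance (lines : List String) (delim : String) (min_cols : Int) (out : Int) : Decidable (Spec_find_header_row_py lines delim min_cols out) := by unfold Spec_find_header_row_py; infer_instance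

-- ===== CLAIM (what is proved, stated in full; the proofs are below) =====
def Claim_equal_find_header_row_py : Prop := ∀ (lines : List String) (delim : String) (min_cols : Int), Dom_find_header_row_py lines delim min_cols → Pre_find_header_row_py lines delim min_cols → Spec_find_header_row_py lines delim min_cols (find_header_row_py lines delim min_cols)

-- ===== LEMMAS AND PROOFS =====
-- A's loop equals: first match if any, otherwise the argmax pass from the same state.
theorem pvALoop_eq (delim : String) (min_cols : Int) (l : List (Int × String)) :
    ∀ bi bc : Int, pvALoop delim min_cols l bi bc =
      match pvBFind delim min_cols l with
      | some i => i
      | none => pvBBest delim l bi bc := by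
  induction l with
  | nil => intro bi bc; simp [pvALoop, pvBFind, pvBBest]
  | cons hd tl ih =>
    intro bi bc
    obtain ⟨i, ln⟩ := hd
    simp only [pvALoop, pvBFind, pvBBest]
    split_ifs with h1 h2 h2 <;> simp [ih]

-- ===== VERDICT (by name: the statement is the Claim_ definition above) =====
theorem find_header_row_py_spec : Claim_equal_find_header_row_py := by
  intro lines delim min_cols _ _
  unfold Spec_find_header_row_py find_header_row_py find_header_row_py_alt
  exact pvALoop_eq delim min_cols _ 0 0
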